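-- pv_equiv track=rewrite | github.com/baexxbin/Algorithm | Programmers_Python/lv2_더 맵게.py | solution
-- ===== SOURCE A (Python) =====
-- import heapq
--
-- def solution(scoville, K):
--     heapq.heapify(scoville)
--     cnt = 0
--     while scoville[0] < K:
--         heapq.heappush(scoville, heapq.heappop(scoville) + (heapq.heappop(scoville) * 2))
--         cnt += 1
--
--         if len(scoville) == 1 and scoville[0] < K:
--             return -1
--
--     return cnt
-- ===== SOURCE B (Python) =====
-- def _insert_sorted(s, x):
--     # insert x into the ascending list s, after any equal elements
--     out = []
--     i = 0
--     while i < len(s) and s[i] <= x: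
--         out.append(s[i])
--         i += 1
--     out.append(x)
--     out.extend(s[i:])
--     return out
--
-- def solution(scoville, K):
--     s = sorted(scoville)
--     cnt = 0
--     while s[0] < K:
--         if len(s) == 1:
--             return -1
--         a, b = s[0], s[1]
--         s = _insert_sorted(s[2:], a + 2 * b)
--         cnt += 1
--     return cnt
-- ===== Notes on version B (the rewrite author's own statement) =====
-- stated objective: alternative
-- what changed: Replaces the binary heap with a sorted list: sort once, take the two smallest from the front and reinsert the mix in order, instead of heapify/heappop/heappush.
import Mathlib
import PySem

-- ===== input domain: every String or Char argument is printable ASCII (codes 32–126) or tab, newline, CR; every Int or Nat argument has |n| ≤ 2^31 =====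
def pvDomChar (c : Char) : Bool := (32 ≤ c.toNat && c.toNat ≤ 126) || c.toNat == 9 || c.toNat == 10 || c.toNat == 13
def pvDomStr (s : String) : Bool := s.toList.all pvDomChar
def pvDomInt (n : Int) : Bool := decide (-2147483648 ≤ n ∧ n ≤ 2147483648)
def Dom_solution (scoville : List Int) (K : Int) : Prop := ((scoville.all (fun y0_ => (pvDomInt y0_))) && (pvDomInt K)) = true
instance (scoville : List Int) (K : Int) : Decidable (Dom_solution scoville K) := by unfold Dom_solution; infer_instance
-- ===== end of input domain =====

-- B replaces A's binary heap with a single sort plus in-order reinsertion of each mix;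
-- equivalence is about the RETURN value only: the Python A heapifies/mutates `scoville`
-- in place, B does not.

-- ===== PORT A =====
-- heapq is not in PySem, so it is ported by hand as a min-heap (skew heap).  This is
-- exact with respect to every observation A makes of the list — len(scoville),
-- scoville[0] (the minimum after heapify), heappop (remove and return the minimum),
-- heappush (insert) — though the internal array layout of CPython's heap is not modelled.
inductive PvHeap where
  | nil : PvHeap
  | node : Int → PvHeap → PvHeap → PvHeap

def PvHeap.size : PvHeap → Nat
  | .nil => 0
  | .node _ l r => l.size + r.size + 1

def pvHeapMerge : PvHeap → PvHeap → PvHeap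
  | .nil, h => h
  | h, .nil => h
  | .node a l1 r1, .node b l2 r2 =>
    if a ≤ b then .node a (pvHeapMerge r1 (.node b l2 r2)) l1
    else .node b (pvHeapMerge r2 (.node a l1 r1)) l2
termination_by h1 h2 => h1.size + h2.size
decreasing_by all_goals (simp only [PvHeap.size]; omega)

def pvHeapPush (h : PvHeap) (x : Int) : PvHeap := pvHeapMerge h (.node x .nil .nil)

def pvHeapPeek? : PvHeap → Option Int
  | .nil => none
  | .node v _ _ => some v

def pvHeapPop? : PvHeap → Option (Int × PvHeap)
  | .nil => none
  | .node v l r => some (v, pvHeapMerge l r)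

-- heapq.heapify(scoville): build the heap from the list
def pvHeapify (l : List Int) : PvHeap := l.foldl pvHeapPush .nil

-- the while-loop of A; fuel only makes the recursion total (scoville.length is enough:
-- each iteration removes one element)
def pvLoopA : Nat → PvHeap → Int → Int → Int
  | 0, _, _, _ => 0  -- fuel exhausted: never reached when fuel ≥ number of pots
  | fuel + 1, h, K, cnt =>
    match pvHeapPeek? h with
    | none => 0  -- Python raises IndexError (scoville[0] on an empty list); outside Pre_
    | some m =>
      if m < K then
        match pvHeapPop? h with
        | none => 0  -- unreachable: the heap is nonempty here
        | some (a, h1) =>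
          match pvHeapPop? h1 with
          | none => 0  -- Python raises IndexError on the second heappop; outside Pre_
          | some (b, h2) =>
            let h3 := pvHeapPush h2 (a + b * 2)
            if h3.size = 1 ∧ (pvHeapPeek? h3).getD 0 < K then -1
            else pvLoopA fuel h3 K (cnt + 1)
      else cnt

def solution (scoville : List Int) (K : Int) : Int :=
  pvLoopA scoville.length (pvHeapify scoville) K 0

-- ===== PORT B =====
-- _insert_sorted(s, x): copy the prefix ≤ x, then x, then the rest
def pvInsertSorted : List Int → Int → List Int
  | [], x => [x]
  | y :: t, x => if y ≤ x then y :: pvInsertSorted t x else x :: y :: t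

-- the while-loop of B; fuel only makes the recursion total (as in pvLoopA)
def pvLoopB : Nat → List Int → Int → Int → Int
  | 0, _, _, _ => 0  -- fuel exhausted: never reached when fuel ≥ number of pots
  | fuel + 1, s, K, cnt =>
    match s with
    | [] => 0  -- Python raises IndexError (s[0] on an empty list); outside Pre_
    | x :: rest =>
      if x < K then
        match rest with
        | [] => -1
        | b :: rest2 => pvLoopB fuel (pvInsertSorted rest2 (x + 2 * b)) K (cnt + 1)
      else cnt

def solution_alt (scoville : List Int) (K : Int) : Int :=
  pvLoopB scoville.length (PySem.List.sorted scoville (fun x => x) false) K 0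

-- ===== PRECONDITION & SPEC =====
-- Pre_ excludes exactly the inputs where the Python A raises IndexError: the empty list
-- (scoville[0]) and a one-element list below K (the second heappop).
def Pre_solution (scoville : List Int) (K : Int) : Prop :=
  scoville ≠ [] ∧ (scoville.length = 1 → K ≤ scoville.headI)
instance (scoville : List Int) (K : Int) : Decidable (Pre_solution scoville K) := by
  unfold Pre_solution; infer_instance

def pvWitness_solution : List Int × Int := ([1, 2], 7)

def Spec_solution (scoville : List Int) (K : Int) (out : Int) : Prop := out = solution_alt scoville K
instance (scoville : List Int) (K : Int) (out : Int) : Decidable (Spec_solution scoville K out) := by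
  unfold Spec_solution; infer_instance

-- ===== CLAIM (what is proved, stated in full; the proofs are below) =====
def Claim_equal_solution : Prop := ∀ (scoville : List Int) (K : Int), Dom_solution scoville K → Pre_solution scoville K → Spec_solution scoville K (solution scoville K)


-- ===== LEMMAS AND PROOFS =====

-- multiset of elements of a heap
def pvHeapMS : PvHeap → Multiset Int
  | .nil => 0
  | .node v l r => v ::ₘ (pvHeapMS l + pvHeapMS r)

-- the heap invariant: every node is ≤ everything below it
def pvIsHeap : PvHeap → Prop
  | .nil => True
  | .node v l r => (∀ x ∈ pvHeapMS l + pvHeapMS r, v ≤ x) ∧ pvIsHeap l ∧ pvIsHeap r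

lemma pvHeapMerge_ms (a b : PvHeap) : pvHeapMS (pvHeapMerge a b) = pvHeapMS a + pvHeapMS b := by
  induction a, b using pvHeapMerge.induct with
  | case1 h => simp [pvHeapMerge, pvHeapMS]
  | case2 h _ => cases h <;> simp [pvHeapMerge, pvHeapMS]
  | case3 a l1 r1 b l2 r2 hab ih =>
      simp only [pvHeapMerge, if_pos hab, pvHeapMS, ih, ← Multiset.singleton_add]
      abel
  | case4 a l1 r1 b l2 r2 hab ih =>
      simp only [pvHeapMerge, if_neg hab, pvHeapMS, ih, ← Multiset.singleton_add]
      abel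

lemma pvHeapMerge_isHeap {a b : PvHeap} (ha : pvIsHeap a) (hb : pvIsHeap b) :
    pvIsHeap (pvHeapMerge a b) := by
  induction a, b using pvHeapMerge.induct with
  | case1 h => simpa [pvHeapMerge] using hb
  | case2 h _ => cases h <;> simp_all [pvHeapMerge]
  | case3 a l1 r1 b l2 r2 hab ih =>
      obtain ⟨ha1, hal, har⟩ := ha
      obtain ⟨hb1, hbl, hbr⟩ := hb
      rw [pvHeapMerge, if_pos hab]
      refine ⟨?_, ih har ⟨hb1, hbl, hbr⟩, hal⟩
      intro x hx
      rw [pvHeapMerge_ms] at hx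
      simp only [Multiset.mem_add, pvHeapMS, Multiset.mem_cons] at hx
      rcases hx with (hx | (rfl | (hx | hx))) | hx
      · exact ha1 x (Multiset.mem_add.mpr (Or.inr hx))
      · exact hab
      · exact le_trans hab (hb1 x (Multiset.mem_add.mpr (Or.inl hx)))
      · exact le_trans hab (hb1 x (Multiset.mem_add.mpr (Or.inr hx)))
      · exact ha1 x (Multiset.mem_add.mpr (Or.inl hx))
  | case4 a l1 r1 b l2 r2 hab ih =>
      obtain ⟨ha1, hal, har⟩ := ha
      obtain ⟨hb1, hbl, hbr⟩ := hb
      have hba : b ≤ a := (not_le.mp hab).le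
      rw [pvHeapMerge, if_neg hab]
      refine ⟨?_, ih hbr ⟨ha1, hal, har⟩, hbl⟩
      intro x hx
      rw [pvHeapMerge_ms] at hx
      simp only [Multiset.mem_add, pvHeapMS, Multiset.mem_cons] at hx
      rcases hx with (hx | (rfl | (hx | hx))) | hx
      · exact hb1 x (Multiset.mem_add.mpr (Or.inr hx))
      · exact hba
      · exact le_trans hba (ha1 x (Multiset.mem_add.mpr (Or.inl hx)))
      · exact le_trans hba (ha1 x (Multiset.mem_add.mpr (Or.inr hx)))
      · exact hb1 x (Multiset.mem_add.mpr (Or.inl hx))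

lemma pvHeapPush_ms (h : PvHeap) (x : Int) : pvHeapMS (pvHeapPush h x) = x ::ₘ pvHeapMS h := by
  rw [pvHeapPush, pvHeapMerge_ms]
  simp only [pvHeapMS, add_zero, ← Multiset.singleton_add]
  abel

lemma pvHeapPush_isHeap {h : PvHeap} (hh : pvIsHeap h) (x : Int) : pvIsHeap (pvHeapPush h x) := by
  refine pvHeapMerge_isHeap hh ?_
  simp [pvIsHeap, pvHeapMS]

lemma pvHeapify_ms (l : List Int) : pvHeapMS (pvHeapify l) = ↑l := by
  suffices h : ∀ (l : List Int) (acc : PvHeap),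
      pvHeapMS (l.foldl pvHeapPush acc) = pvHeapMS acc + ↑l by
    simpa [pvHeapMS] using h l .nil
  intro l
  induction l with
  | nil => simp
  | cons x t ih =>
      intro acc
      simp only [List.foldl_cons, ih, pvHeapPush_ms, ← Multiset.cons_coe,
        ← Multiset.singleton_add]
      abel

lemma pvHeapify_isHeap (l : List Int) : pvIsHeap (pvHeapify l) := by
  suffices h : ∀ (l : List Int) (acc : PvHeap), pvIsHeap acc → pvIsHeap (l.foldl pvHeapPush acc) by
    exact h l .nil (by simp [pvIsHeap])
  intro l
  induction l with
  | nil => intro acc hacc; simpa using hacc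
  | cons x t ih => intro acc hacc; exact ih _ (pvHeapPush_isHeap hacc x)

lemma pvHeapSize_eq (h : PvHeap) : h.size = Multiset.card (pvHeapMS h) := by
  induction h with
  | nil => simp [PvHeap.size, pvHeapMS]
  | node v l r ihl ihr => simp only [PvHeap.size, pvHeapMS, Multiset.card_cons, Multiset.card_add, ihl, ihr]

lemma pvHeapMS_eq_zero {h : PvHeap} (hz : pvHeapMS h = 0) : h = .nil := by
  cases h with
  | nil => rfl
  | node v l r => simp [pvHeapMS] at hz

lemma pvRoot_min {v : Int} {l r : PvHeap} (hh : pvIsHeap (.node v l r)) :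
    ∀ x ∈ pvHeapMS (.node v l r), v ≤ x := by
  intro x hx
  simp only [pvHeapMS, Multiset.mem_cons] at hx
  rcases hx with rfl | hx
  · exact le_refl x
  · exact hh.1 x hx

-- extracting the head: a sorted list with the heap's multiset starts with the heap's root
lemma pvHead_step {v : Int} {l r : PvHeap} {x : Int} {rest : List Int}
    (hh : pvIsHeap (.node v l r))
    (hms : (↑(x :: rest) : Multiset Int) = pvHeapMS (.node v l r))
    (hsort : (x :: rest).Pairwise (· ≤ ·)) :
    v = x ∧ (↑rest : Multiset Int) = pvHeapMS l + pvHeapMS r := by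
  have hvmem : v ∈ (x :: rest) := by
    rw [← Multiset.mem_coe, hms]; simp [pvHeapMS]
  have hxmem : x ∈ pvHeapMS (.node v l r) := by
    rw [← hms]; simp
  have hxv : x ≤ v := by
    rcases List.mem_cons.mp hvmem with rfl | hv
    · exact le_refl v
    · exact (List.pairwise_cons.mp hsort).1 v hv
  have hvx : v ≤ x := pvRoot_min hh x hxmem
  have hvx' : v = x := le_antisymm hvx hxv
  subst hvx'
  refine ⟨rfl, ?_⟩
  have : (v ::ₘ (↑rest : Multiset Int)) = v ::ₘ (pvHeapMS l + pvHeapMS r) := by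
    rw [← Multiset.cons_coe] at hms; exact hms
  exact (Multiset.cons_inj_right v).mp this

lemma pvInsertSorted_ms (s : List Int) (x : Int) :
    (↑(pvInsertSorted s x) : Multiset Int) = x ::ₘ ↑s := by
  induction s with
  | nil => simp [pvInsertSorted]
  | cons y t ih =>
      by_cases h : y ≤ x
      · rw [pvInsertSorted, if_pos h, ← Multiset.cons_coe, ih, ← Multiset.cons_coe,
          Multiset.cons_swap]
      · rw [pvInsertSorted, if_neg h, ← Multiset.cons_coe]

lemma pvInsertSorted_length (s : List Int) (x : Int) :
    (pvInsertSorted s x).length = s.length + 1 := by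
  induction s with
  | nil => simp [pvInsertSorted]
  | cons y t ih =>
      by_cases h : y ≤ x
      · simp [pvInsertSorted, if_pos h, ih]
      · simp [pvInsertSorted, if_neg h]

lemma pvInsertSorted_mem {s : List Int} {x z : Int} (hz : z ∈ pvInsertSorted s x) :
    z = x ∨ z ∈ s := by
  have := pvInsertSorted_ms s x
  have hz' : z ∈ (↑(pvInsertSorted s x) : Multiset Int) := Multiset.mem_coe.mpr hz
  rw [this, Multiset.mem_cons] at hz'
  simpa using hz'

lemma pvInsertSorted_pairwise {s : List Int} (hs : s.Pairwise (· ≤ ·)) (x : Int) :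
    (pvInsertSorted s x).Pairwise (· ≤ ·) := by
  induction s with
  | nil => simp [pvInsertSorted]
  | cons y t ih =>
      obtain ⟨hy, ht⟩ := List.pairwise_cons.mp hs
      by_cases h : y ≤ x
      · rw [pvInsertSorted, if_pos h]
        refine List.pairwise_cons.mpr ⟨?_, ih ht⟩
        intro z hz
        rcases pvInsertSorted_mem hz with rfl | hz
        · exact h
        · exact hy z hz
      · rw [pvInsertSorted, if_neg h]
        have hxy : x ≤ y := (not_le.mp h).le
        refine List.pairwise_cons.mpr ⟨?_, hs⟩
        intro z hz
        rcases List.mem_cons.mp hz with rfl | hz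
        · exact hxy
        · exact le_trans hxy (hy z hz)

-- the two loops agree whenever the heap holds the same multiset as the sorted list
lemma pvLoop_eq (K : Int) : ∀ (fuel : Nat) (s : List Int) (h : PvHeap) (cnt : Int),
    s.length ≤ fuel → s.Pairwise (· ≤ ·) → (↑s : Multiset Int) = pvHeapMS h → pvIsHeap h →
    ¬(s.length = 1 ∧ s.headI < K) →
    pvLoopA fuel h K cnt = pvLoopB fuel s K cnt := by
  intro fuel
  induction fuel with
  | zero =>
      intro s h cnt hlen _ _ _ _
      simp [pvLoopA, pvLoopB]
  | succ fuel ih =>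
      intro s h cnt hlen hsort hms hheap hcorner
      cases s with
      | nil =>
          have : h = .nil := pvHeapMS_eq_zero (by simpa using hms.symm)
          subst this
          simp [pvLoopA, pvLoopB, pvHeapPeek?]
      | cons x rest =>
          cases h with
          | nil => simp [pvHeapMS] at hms
          | node v l r =>
              obtain ⟨rfl, hrest⟩ := pvHead_step hheap hms hsort
              by_cases hxK : v < K
              · cases rest with
                | nil => exact absurd ⟨rfl, hxK⟩ hcorner
                | cons b rest2 =>
                    obtain ⟨hv1, hl, hr⟩ := hheap
                    have hh1 : pvIsHeap (pvHeapMerge l r) := pvHeapMerge_isHeap hl hr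
                    have hms1 : (↑(b :: rest2) : Multiset Int) = pvHeapMS (pvHeapMerge l r) := by
                      rw [pvHeapMerge_ms]; exact hrest
                    have hsort1 : (b :: rest2).Pairwise (· ≤ ·) :=
                      (List.pairwise_cons.mp hsort).2
                    cases hh1case : pvHeapMerge l r with
                    | nil => rw [hh1case] at hms1; simp [pvHeapMS] at hms1
                    | node v2 l2 r2 =>
                        have hh1' : pvIsHeap (.node v2 l2 r2) := hh1case ▸ hh1
                        obtain ⟨rfl, hrest2⟩ := pvHead_step hh1' (hh1case ▸ hms1) hsort1
                        obtain ⟨hv2, hl2, hr2⟩ := hh1'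
                        have hh2 : pvIsHeap (pvHeapMerge l2 r2) := pvHeapMerge_isHeap hl2 hr2
                        -- the mixed pot: A writes a + b*2, B writes a + 2*b
                        have hmix : v + v2 * 2 = v + 2 * v2 := by ring
                        set h3 := pvHeapPush (pvHeapMerge l2 r2) (v + v2 * 2) with hh3def
                        set s' := pvInsertSorted rest2 (v + 2 * v2) with hs'def
                        have hmss' : (↑s' : Multiset Int) = pvHeapMS h3 := by
                          rw [hh3def, pvHeapPush_ms, pvHeapMerge_ms, hs'def, pvInsertSorted_ms,
                            ← hrest2, hmix]
                        have hsorts' : s'.Pairwise (· ≤ ·) :=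
                          pvInsertSorted_pairwise (List.pairwise_cons.mp hsort1).2 _
                        have hheaps' : pvIsHeap h3 := pvHeapPush_isHeap hh2 _
                        have hlens' : s'.length = rest2.length + 1 := by
                          rw [hs'def, pvInsertSorted_length]
                        have hlen2 : rest2.length + 2 ≤ fuel + 1 := by simpa using hlen
                        have hsizes' : h3.size = s'.length := by
                          rw [pvHeapSize_eq, ← hmss', Multiset.coe_card]
                        cases hs'cases : s' with
                        | nil => rw [hs'cases] at hlens'; simp at hlens'
                        | cons x' rest' =>
                            cases hh3case : h3 with
                            | nil =>
                                rw [hh3case] at hmss'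
                                simp [pvHeapMS, hs'cases] at hmss'
                            | node w l3 r3 =>
                                have hms3 : (↑(x' :: rest') : Multiset Int)
                                    = pvHeapMS (.node w l3 r3) := by
                                  rw [← hs'cases, ← hh3case]; exact hmss'
                                have hsort3 : (x' :: rest').Pairwise (· ≤ ·) := by
                                  rw [← hs'cases]; exact hsorts'
                                have hih3 : pvIsHeap (.node w l3 r3) := hh3case ▸ hheaps'
                                obtain ⟨hwx, -⟩ := pvHead_step hih3 hms3 hsort3
                                -- unfold one step of each loop
                                rw [pvLoopA, pvLoopB]
                                simp only [pvHeapPeek?, pvHeapPop?, if_pos hxK, hh1case,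
                                  ← hh3def, hh3case, Option.getD_some]
                                have hsz : (PvHeap.node w l3 r3).size = s'.length := by
                                  rw [← hh3case]; exact hsizes'
                                rw [hsz]
                                by_cases hguard : s'.length = 1 ∧ w < K
                                · rw [if_pos hguard]
                                  have hrest' : rest' = [] := by
                                    have := hguard.1
                                    rw [hs'cases] at this
                                    simpa using this
                                  obtain ⟨fuel', rfl⟩ : ∃ m, fuel = m + 1 :=
                                    ⟨fuel - 1, by omega⟩
                                  have hs1 : pvInsertSorted rest2 (v + 2 * v2) = [x'] := by
                                    rw [← hs'def, hs'cases, hrest']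
                                  rw [hs1]
                                  simp [pvLoopB, hwx ▸ hguard.2]
                                · rw [if_neg hguard, ← hh3case]
                                  refine ih s' h3 (cnt + 1) (by omega) hsorts' hmss' hheaps' ?_
                                  intro hc
                                  refine hguard ⟨hc.1, ?_⟩
                                  have : s'.headI = x' := by rw [hs'cases]; simp
                                  rw [hwx, ← this]
                                  exact hc.2
              · rw [pvLoopA, pvLoopB.eq_def]
                simp [pvHeapPeek?, hxK]

-- ===== VERDICT (by name: the statement is the Claim_ definition above) =====
theorem solution_spec : Claim_equal_solution := by
  intro scoville K _ hpre
  show solution scoville K = solution_alt scoville K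
  rw [solution, solution_alt]
  have hperm : (PySem.List.sorted scoville (fun x => x) false).Perm scoville :=
    PySem.List.sorted_perm _ _ _
  refine pvLoop_eq K scoville.length _ _ 0 ?_ ?_ ?_ (pvHeapify_isHeap scoville) ?_
  · rw [hperm.length_eq]
  · simpa using PySem.List.sorted_pairwise (xs := scoville) (key := fun x => x)
  · rw [pvHeapify_ms]
    exact Multiset.coe_eq_coe.mpr hperm
  · rw [hperm.length_eq]
    intro ⟨h1, h2⟩
    obtain ⟨a, rfl⟩ := List.length_eq_one_iff.mp h1
    have : PySem.List.sorted [a] (fun x => x) false = [a] :=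
      List.perm_singleton.mp hperm
    rw [this] at h2
    exact absurd (hpre.2 h1) (not_le.mpr h2)
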